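-- pv_equiv track=rewrite | github.com/Jonaaa80/Rubitherm_Capstone | src/pipeline/ai_controller.py | _best_token_match_in_email
-- ===== SOURCE A (Python) =====
-- def _best_token_match_in_email(tokens: list[str], email: str) -> str | None:
--     """
--     Find the longest token that appears in the email's local-part (before @).
--     Returns the best matching token, or None if no token matches.
--     """
--     if not tokens or not email:
--         return None
--     local = email.split("@", 1)[0].lower()
--     best = None
--     for tok in tokens:
--         lt = tok.lower()
--         if lt in local:
--             if best is None or len(lt) > len(best):
--                 best = lt
--     if best is None:
--         return None
--     # Return the original-cased token
--     for t in tokens: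
--         if t.lower() == best:
--             return t
--     return best
-- ===== SOURCE B (Python) =====
-- def _best_token_match_in_email(tokens: list[str], email: str) -> str | None:
--     if not tokens or not email:
--         return None
--     local = email.split("@", 1)[0].lower()
--     # Stable sort by descending length: the first matching token in this order
--     # is exactly the first-in-original-order longest match.
--     for t in sorted(tokens, key=lambda t: -len(t)):
--         if t.lower() in local:
--             return t
--     return None
-- ===== Notes on version B (the rewrite author's own statement) =====
-- stated objective: alternative
-- what changed: Replaces A's max-tracking scan plus second casing-recovery loop with a stable sort of the tokens by descending length followed by a first-match scan that returns the original-cased token at the first hit.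
import Mathlib
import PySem

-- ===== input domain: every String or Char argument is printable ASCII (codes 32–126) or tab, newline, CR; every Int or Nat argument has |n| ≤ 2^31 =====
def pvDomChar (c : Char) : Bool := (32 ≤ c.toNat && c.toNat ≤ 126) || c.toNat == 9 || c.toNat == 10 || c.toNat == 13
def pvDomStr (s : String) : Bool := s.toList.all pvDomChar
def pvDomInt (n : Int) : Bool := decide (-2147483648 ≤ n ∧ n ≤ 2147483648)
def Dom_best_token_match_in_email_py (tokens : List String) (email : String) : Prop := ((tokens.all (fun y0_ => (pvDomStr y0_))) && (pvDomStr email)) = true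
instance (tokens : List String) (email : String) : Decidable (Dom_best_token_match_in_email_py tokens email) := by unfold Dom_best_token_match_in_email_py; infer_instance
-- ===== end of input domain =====

-- B replaces A's max-tracking scan plus second casing-recovery loop with a stable sort of the
-- tokens by descending length followed by a single first-match scan; same results, similar cost.

-- ===== PORT A =====
-- shared helper: the Python line  local = email.split("@", 1)[0].lower()  (identical in A and B)
def pvLocalPart (email : String) : String :=
  PySem.Str.lower (PySem.List.pyGetD ((PySem.Str.splitMax? email "@" 1).getD []) 0 "")

def best_token_match_in_email_py (tokens : List String) (email : String) : Option String :=
  if tokens = [] ∨ email = "" then none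
  else
    match tokens.foldl (fun best tok =>
      let lt := PySem.Str.lower tok
      if PySem.Str.isIn lt (pvLocalPart email) then
        match best with
        | none => some lt
        | some b => if PySem.Str.len b < PySem.Str.len lt then some lt else some b
      else best) none with
    | none => none
    | some b =>
      match tokens.find? (fun t => PySem.Str.lower t == b) with
      | some t => some t
      | none => some b

-- ===== PORT B =====
def best_token_match_in_email_py_alt (tokens : List String) (email : String) : Option String :=
  if tokens = [] ∨ email = "" then none
  else
    (PySem.List.sorted tokens (fun t => -(PySem.Str.len t)) false).find?
      (fun t => PySem.Str.isIn (PySem.Str.lower t) (pvLocalPart email))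

-- ===== PRECONDITION & SPEC =====
def Spec_best_token_match_in_email_py (tokens : List String) (email : String) (out : Option String) : Prop := out = best_token_match_in_email_py_alt tokens email
instance (tokens : List String) (email : String) (out : Option String) : Decidable (Spec_best_token_match_in_email_py tokens email out) := by unfold Spec_best_token_match_in_email_py; infer_instance

-- ===== CLAIM (what is proved, stated in full; the proofs are below) =====
def Claim_equal_best_token_match_in_email_py : Prop := ∀ (tokens : List String) (email : String), Dom_best_token_match_in_email_py tokens email → Spec_best_token_match_in_email_py tokens email (best_token_match_in_email_py tokens email)

-- ===== LEMMAS AND PROOFS =====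

-- A's max-tracking loop, carried out over the ORIGINAL tokens (the proofs bridge to A's
-- lowercase accumulator with pv_fold_map)
def pvStep (loc : String) (acc : Option String) (t : String) : Option String :=
  if PySem.Str.isIn (PySem.Str.lower t) loc then
    match acc with
    | none => some t
    | some m => if PySem.Str.len m < PySem.Str.len t then some t else some m
  else acc

theorem pv_len_lower_chars (xs : List Char) : (PySem.Chars.lower xs).length = xs.length := by
  simp [PySem.Chars.lower]

theorem pv_fold_map (loc : String) (l : List String) (acc : Option String) :
    l.foldl (fun best tok =>
      let lt := PySem.Str.lower tok
      if PySem.Str.isIn lt loc then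
        match best with
        | none => some lt
        | some b => if PySem.Str.len b < PySem.Str.len lt then some lt else some b
      else best) (Option.map PySem.Str.lower acc)
    = Option.map PySem.Str.lower (l.foldl (pvStep loc) acc) := by
  induction l generalizing acc with
  | nil => rfl
  | cons t rest ih =>
    simp only [List.foldl_cons]
    rw [← ih (pvStep loc acc t)]
    congr 1
    by_cases hP : PySem.Chars.isIn (PySem.Chars.lower t.toList) loc.toList = true
    · cases acc with
      | none => simp [pvStep, hP]
      | some m => simp [pvStep, hP, pv_len_lower_chars]; split <;> simp
    · cases acc with
      | none => simp [pvStep, hP]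
      | some m => simp [pvStep, hP]

theorem pv_len_lower (t : String) : PySem.Str.len (PySem.Str.lower t) = PySem.Str.len t := by
  simp [PySem.Str.len, PySem.Chars.lower]

theorem pv_key_of_lower_eq {t m : String} (h : PySem.Str.lower t = PySem.Str.lower m) :
    PySem.Str.len t = PySem.Str.len m := by
  rw [← pv_len_lower t, ← pv_len_lower m, h]

theorem pv_fold_P (loc : String) (l : List String) (acc : Option String)
    (hacc : ∀ m, acc = some m → PySem.Str.isIn (PySem.Str.lower m) loc = true) :
    ∀ m, l.foldl (pvStep loc) acc = some m → PySem.Str.isIn (PySem.Str.lower m) loc = true := by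
  induction l generalizing acc with
  | nil => exact hacc
  | cons t rest ih =>
    intro m hm
    rw [List.foldl_cons] at hm
    refine ih (pvStep loc acc t) ?_ m hm
    intro m' hm'
    unfold pvStep at hm'
    by_cases hP : PySem.Str.isIn (PySem.Str.lower t) loc = true
    · rw [if_pos hP] at hm'
      cases acc with
      | none => cases hm'; exact hP
      | some a =>
        simp only at hm'
        split at hm'
        · obtain rfl := Option.some_inj.mp hm'; exact hP
        · obtain rfl := Option.some_inj.mp hm'; exact hacc a rfl
    · rw [if_neg hP] at hm'
      exact hacc m' hm'

theorem pv_fold_find_some (loc : String) (l : List String) (a m : String)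
    (h : l.foldl (pvStep loc) (some a) = some m) :
    m = a ∨ (PySem.Str.len a < PySem.Str.len m ∧
      PySem.Str.isIn (PySem.Str.lower m) loc = true ∧
      l.find? (fun t => PySem.Str.lower t == PySem.Str.lower m) = some m) := by
  induction l generalizing a with
  | nil => left; cases h; rfl
  | cons t rest ih =>
    rw [List.foldl_cons] at h
    by_cases hP : PySem.Str.isIn (PySem.Str.lower t) loc = true
    · by_cases hk : PySem.Str.len a < PySem.Str.len t
      · have hstep : pvStep loc (some a) t = some t := by
          unfold pvStep
          rw [if_pos hP]
          show (if PySem.Str.len a < PySem.Str.len t then some t else some a) = some t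
          rw [if_pos hk]
        rw [hstep] at h
        rcases ih t h with rfl | ⟨hlt, hPm, hfind⟩
        · right
          refine ⟨hk, hP, ?_⟩
          rw [List.find?_cons_of_pos (by simp)]
        · right
          have hne : (PySem.Str.lower t == PySem.Str.lower m) = false := by
            by_contra hc
            have heq : PySem.Str.lower t = PySem.Str.lower m :=
              eq_of_beq (by simpa using eq_true_of_ne_false hc)
            have := pv_key_of_lower_eq heq
            omega
          refine ⟨by omega, hPm, ?_⟩
          rw [List.find?_cons_of_neg (by simp [hne]), hfind]
      · have hstep : pvStep loc (some a) t = some a := by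
          unfold pvStep
          rw [if_pos hP]
          show (if PySem.Str.len a < PySem.Str.len t then some t else some a) = some a
          rw [if_neg hk]
        rw [hstep] at h
        rcases ih a h with rfl | ⟨hlt, hPm, hfind⟩
        · left; rfl
        · right
          have hne : (PySem.Str.lower t == PySem.Str.lower m) = false := by
            by_contra hc
            have heq : PySem.Str.lower t = PySem.Str.lower m :=
              eq_of_beq (by simpa using eq_true_of_ne_false hc)
            have hkey := pv_key_of_lower_eq heq
            have hPtm : PySem.Str.isIn (PySem.Str.lower t) loc = PySem.Str.isIn (PySem.Str.lower m) loc := by rw [heq]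
            omega
          refine ⟨hlt, hPm, ?_⟩
          rw [List.find?_cons_of_neg (by simp [hne]), hfind]
    · have hstep : pvStep loc (some a) t = some a := by
        unfold pvStep; rw [if_neg hP]
      rw [hstep] at h
      rcases ih a h with rfl | ⟨hlt, hPm, hfind⟩
      · left; rfl
      · right
        have hne : (PySem.Str.lower t == PySem.Str.lower m) = false := by
          by_contra hc
          have heq : PySem.Str.lower t = PySem.Str.lower m :=
            eq_of_beq (by simpa using eq_true_of_ne_false hc)
          rw [heq] at hP
          exact hP hPm
        refine ⟨hlt, hPm, ?_⟩
        rw [List.find?_cons_of_neg (by simp [hne]), hfind]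

theorem pv_fold_find (loc : String) (l : List String) (m : String)
    (h : l.foldl (pvStep loc) none = some m) :
    l.find? (fun t => PySem.Str.lower t == PySem.Str.lower m) = some m := by
  induction l with
  | nil => cases h
  | cons t rest ih =>
    rw [List.foldl_cons] at h
    by_cases hP : PySem.Str.isIn (PySem.Str.lower t) loc = true
    · have hstep : pvStep loc none t = some t := by unfold pvStep; rw [if_pos hP]
      rw [hstep] at h
      rcases pv_fold_find_some loc rest t m h with rfl | ⟨hlt, _, hfind⟩
      · rw [List.find?_cons_of_pos (by simp)]
      · have hne : (PySem.Str.lower t == PySem.Str.lower m) = false := by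
          by_contra hc
          have heq : PySem.Str.lower t = PySem.Str.lower m :=
            eq_of_beq (by simpa using eq_true_of_ne_false hc)
          have := pv_key_of_lower_eq heq
          omega
        rw [List.find?_cons_of_neg (by simp [hne]), hfind]
    · have hstep : pvStep loc none t = none := by unfold pvStep; rw [if_neg hP]
      rw [hstep] at h
      have hPm := pv_fold_P loc rest none (by intro m' h'; cases h') m h
      have hne : (PySem.Str.lower t == PySem.Str.lower m) = false := by
        by_contra hc
        have heq : PySem.Str.lower t = PySem.Str.lower m :=
          eq_of_beq (by simpa using eq_true_of_ne_false hc)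
        rw [heq] at hP
        exact hP hPm
      rw [List.find?_cons_of_neg (by simp [hne]), ih h]

-- B-side: insertBy splits at the first strictly-smaller key
theorem pv_insertBy_eq (before : String → String → Bool) (x : String) (ys : List String) :
    PySem.List.insertBy before x ys
      = ys.takeWhile (fun y => !(before x y)) ++ x :: ys.dropWhile (fun y => !(before x y)) := by
  induction ys with
  | nil => rfl
  | cons y t ih =>
    by_cases h : before x y = true
    · simp [PySem.List.insertBy, h]
    · simp only [Bool.not_eq_true] at h
      simp [PySem.List.insertBy, h, ih]

-- inserting one token into a key-sorted accumulator advances first-match exactly like pvStep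
theorem pv_find_insertBy (loc : String) (x : String) (acc : List String)
    (hpw : acc.Pairwise (fun a b => -(PySem.Str.len a) ≤ -(PySem.Str.len b))) :
    (PySem.List.insertBy (fun a b => decide (-(PySem.Str.len a) < -(PySem.Str.len b))) x acc).find?
        (fun t => PySem.Str.isIn (PySem.Str.lower t) loc)
      = pvStep loc (acc.find? (fun t => PySem.Str.isIn (PySem.Str.lower t) loc)) x := by
  rw [pv_insertBy_eq, List.find?_append]
  conv_rhs => rw [← List.takeWhile_append_dropWhile
    (p := fun y => !(decide (-(PySem.Str.len x) < -(PySem.Str.len y)))) (l := acc)]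
  rw [List.find?_append]
  cases hL : (acc.takeWhile (fun y => !(decide (-(PySem.Str.len x) < -(PySem.Str.len y))))).find?
      (fun t => PySem.Str.isIn (PySem.Str.lower t) loc) with
  | some m =>
    rw [Option.some_or, Option.some_or]
    have hkey : PySem.Str.len x ≤ PySem.Str.len m := by
      have hq := List.mem_takeWhile_imp (List.mem_of_find?_eq_some hL)
      simp only [Bool.not_eq_eq_eq_not, Bool.not_true, decide_eq_false_iff_not] at hq
      omega
    have hnl : ¬ PySem.Str.len m < PySem.Str.len x := by omega
    show some m = if PySem.Str.isIn (PySem.Str.lower x) loc = true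
      then (if PySem.Str.len m < PySem.Str.len x then some x else some m) else some m
    by_cases hPx : PySem.Str.isIn (PySem.Str.lower x) loc = true
    · rw [if_pos hPx, if_neg hnl]
    · rw [if_neg hPx]
  | none =>
    rw [Option.none_or, Option.none_or, List.find?_cons]
    by_cases hPx : PySem.Str.isIn (PySem.Str.lower x) loc = true
    · rw [hPx]
      cases hR : (acc.dropWhile (fun y => !(decide (-(PySem.Str.len x) < -(PySem.Str.len y))))).find?
          (fun t => PySem.Str.isIn (PySem.Str.lower t) loc) with
      | none =>
        show some x = if PySem.Str.isIn (PySem.Str.lower x) loc = true then some x else none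
        rw [if_pos hPx]
      | some m =>
        have hmem : m ∈ acc.dropWhile (fun y => !(decide (-(PySem.Str.len x) < -(PySem.Str.len y)))) :=
          List.mem_of_find?_eq_some hR
        have hlen : PySem.Str.len m < PySem.Str.len x := by
          cases hD : acc.dropWhile (fun y => !(decide (-(PySem.Str.len x) < -(PySem.Str.len y)))) with
          | nil => rw [hD] at hmem; cases hmem
          | cons h0 t0 =>
            have hhead : (fun y => !(decide (-(PySem.Str.len x) < -(PySem.Str.len y)))) h0 = false := by
              have := List.head?_dropWhile_not
                (fun y => !(decide (-(PySem.Str.len x) < -(PySem.Str.len y)))) acc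
              rw [hD] at this
              simpa using this
            have hh0 : -(PySem.Str.len x) < -(PySem.Str.len h0) := by simpa using hhead
            have hpwD := hpw.sublist
              (List.dropWhile_sublist (fun y => !(decide (-(PySem.Str.len x) < -(PySem.Str.len y)))))
            rw [hD] at hpwD hmem
            rcases List.mem_cons.mp hmem with rfl | hmt
            · omega
            · have := (List.pairwise_cons.mp hpwD).1 m hmt
              omega
        show some x = if PySem.Str.isIn (PySem.Str.lower x) loc = true
          then (if PySem.Str.len m < PySem.Str.len x then some x else some m) else some m
        rw [if_pos hPx, if_pos hlen]
    · have hPx' : PySem.Str.isIn (PySem.Str.lower x) loc = false := by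
        simpa using hPx
      rw [hPx']
      unfold pvStep
      rw [if_neg hPx]

-- find? over the length-sorted list equals A's first-longest fold
theorem pv_find_sorted (loc : String) (l : List String) :
    (PySem.List.sorted l (fun t => -(PySem.Str.len t)) false).find?
        (fun t => PySem.Str.isIn (PySem.Str.lower t) loc)
      = l.foldl (pvStep loc) none := by
  rw [PySem.List.sorted_eq_foldl_insertBy]
  suffices h : ∀ (acc : List String),
      acc.Pairwise (fun a b => -(PySem.Str.len a) ≤ -(PySem.Str.len b)) →
      (l.foldl (fun acc x => PySem.List.insertBy (fun a b => decide (-(PySem.Str.len a) < -(PySem.Str.len b))) x acc) acc).find?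
          (fun t => PySem.Str.isIn (PySem.Str.lower t) loc)
        = l.foldl (pvStep loc) (acc.find? (fun t => PySem.Str.isIn (PySem.Str.lower t) loc)) by
    simpa using h [] (by simp)
  induction l with
  | nil => intro acc _; rfl
  | cons x t ih =>
    intro acc hpw
    rw [List.foldl_cons, List.foldl_cons]
    have hpw' : (PySem.List.insertBy (fun a b => decide (-(PySem.Str.len a) < -(PySem.Str.len b))) x acc).Pairwise
        (fun a b => -(PySem.Str.len a) ≤ -(PySem.Str.len b)) := by
      rw [pv_insertBy_eq]
      -- the split list is still sorted: takeWhile keys ≥ key x, then x, then dropWhile keys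
      have hTsub := List.takeWhile_sublist (l := acc) (fun y => !(decide (-(PySem.Str.len x) < -(PySem.Str.len y))))
      have hDsub := List.dropWhile_sublist (l := acc) (fun y => !(decide (-(PySem.Str.len x) < -(PySem.Str.len y))))
      have hT := hpw.sublist hTsub
      have hD := hpw.sublist hDsub
      rw [List.pairwise_append]
      refine ⟨hT, ?_, ?_⟩
      · rw [List.pairwise_cons]
        constructor
        · intro b hb
          -- x comes before all of dropWhile: head fails q, pairwise carries it on
          cases hAD : acc.dropWhile (fun y => !(decide (-(PySem.Str.len x) < -(PySem.Str.len y)))) with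
          | nil => rw [hAD] at hb; cases hb
          | cons h0 t0 =>
            have hhead : (fun y => !(decide (-(PySem.Str.len x) < -(PySem.Str.len y)))) h0 = false := by
              have := List.head?_dropWhile_not (fun y => !(decide (-(PySem.Str.len x) < -(PySem.Str.len y)))) acc
              rw [hAD] at this; simpa using this
            have hh0 : -(PySem.Str.len x) < -(PySem.Str.len h0) := by simpa using hhead
            rw [hAD] at hD hb
            rcases List.mem_cons.mp hb with rfl | hbt
            · omega
            · have := (List.pairwise_cons.mp hD).1 b hbt
              omega
        · exact hD
      · intro a ha b hb
        have hqa := List.mem_takeWhile_imp ha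
        have hxa : ¬ (-(PySem.Str.len x) < -(PySem.Str.len a)) := by simpa using hqa
        rcases List.mem_cons.mp hb with rfl | hbD
        · omega
        · -- b in dropWhile: key x < key b as above… actually key x ≤ key b suffices
          cases hAD : acc.dropWhile (fun y => !(decide (-(PySem.Str.len x) < -(PySem.Str.len y)))) with
          | nil => rw [hAD] at hbD; cases hbD
          | cons h0 t0 =>
            have hhead : (fun y => !(decide (-(PySem.Str.len x) < -(PySem.Str.len y)))) h0 = false := by
              have := List.head?_dropWhile_not (fun y => !(decide (-(PySem.Str.len x) < -(PySem.Str.len y)))) acc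
              rw [hAD] at this; simpa using this
            have hh0 : -(PySem.Str.len x) < -(PySem.Str.len h0) := by simpa using hhead
            rw [hAD] at hD hbD
            rcases List.mem_cons.mp hbD with rfl | hbt
            · omega
            · have := (List.pairwise_cons.mp hD).1 b hbt
              omega
    rw [ih _ hpw', pv_find_insertBy loc x acc hpw]

-- ===== VERDICT (by name: the statement is the Claim_ definition above) =====
theorem best_token_match_in_email_py_spec : Claim_equal_best_token_match_in_email_py := by
  intro tokens email _
  unfold Spec_best_token_match_in_email_py best_token_match_in_email_py best_token_match_in_email_py_alt
  by_cases hguard : tokens = [] ∨ email = ""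
  · rw [if_pos hguard, if_pos hguard]
  · rw [if_neg hguard, if_neg hguard, pv_find_sorted]
    have hmap := pv_fold_map (pvLocalPart email) tokens none
    simp only [Option.map_none] at hmap
    rw [hmap]
    cases hres : tokens.foldl (pvStep (pvLocalPart email)) none with
    | none => rfl
    | some m =>
      simp only [Option.map_some]
      rw [pv_fold_find (pvLocalPart email) tokens m hres]
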